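-- pv_equiv track=rewrite | github.com/pedropvieira/graphical-sequences | algo.py | checkIfSequenceIsPossible
-- ===== SOURCE A (Python) =====
-- def checkIfSequenceIsPossible(sequence):
-- 	for x in range(len(sequence)-1):
-- 		count = x
-- 		for j in range(x+1,len(sequence)-1):
-- 			if(sequence[j] > 0):
-- 				count += 1
-- 		if count < sequence[x]:
-- 			return False
-- 	return True
-- ===== SOURCE B (Python) =====
-- def checkIfSequenceIsPossible(sequence):
--     body = sequence[:-1]
--     suf = []
--     c = 0
--     for v in reversed(body):
--         suf.append(c)
--         if v > 0:
--             c += 1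
--     suf.reverse()
--     return all(i + s >= v for i, (v, s) in enumerate(zip(body, suf)))
-- ===== Notes on version B (the rewrite author's own statement) =====
-- stated objective: faster
-- what changed: Replaced the O(n^2) rescan of positives for every index by a single right-to-left pass that precomputes suffix counts of positive entries, then one comparison pass.
import Mathlib
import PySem

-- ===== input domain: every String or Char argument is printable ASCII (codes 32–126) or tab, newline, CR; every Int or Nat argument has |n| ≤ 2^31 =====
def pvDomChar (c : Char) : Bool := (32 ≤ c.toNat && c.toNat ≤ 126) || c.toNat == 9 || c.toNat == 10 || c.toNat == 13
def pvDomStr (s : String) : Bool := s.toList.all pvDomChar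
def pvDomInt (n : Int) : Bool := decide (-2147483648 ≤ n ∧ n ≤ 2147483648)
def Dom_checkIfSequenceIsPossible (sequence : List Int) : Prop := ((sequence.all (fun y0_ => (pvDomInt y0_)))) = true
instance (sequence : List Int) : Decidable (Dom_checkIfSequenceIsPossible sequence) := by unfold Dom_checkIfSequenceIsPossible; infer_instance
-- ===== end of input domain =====

-- B replaces A's per-index rescan of the positives to its right by one right-to-left pass
-- precomputing suffix counts of positive entries (objective: faster).

-- ===== PORT A =====
-- inner loop: count = x; for j in range(x+1, len(sequence)-1): if sequence[j] > 0: count += 1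
def pvAInner (sequence : List Int) (x : Int) : Int :=
  (PySem.List.pyRange (x + 1) ((sequence.length : Int) - 1) 1).foldl
    (fun count j => if PySem.List.pyGetD sequence j 0 > 0 then count + 1 else count) x

-- outer loop with early 'return False'
def pvALoop (sequence : List Int) : List Int → Bool
  | [] => true
  | x :: rest =>
      if pvAInner sequence x < PySem.List.pyGetD sequence x 0 then false
      else pvALoop sequence rest

def checkIfSequenceIsPossible (sequence : List Int) : Bool :=
  pvALoop sequence (PySem.List.pyRange 0 ((sequence.length : Int) - 1) 1)

-- ===== PORT B =====
def checkIfSequenceIsPossible_alt (sequence : List Int) : Bool :=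
  -- body = sequence[:-1]
  let body := PySem.List.slice sequence none (some (-1))
  -- suf = []; c = 0; for v in reversed(body): suf.append(c); if v > 0: c += 1
  let st := body.reverse.foldl
    (fun (st : List Int × Int) v => (st.1 ++ [st.2], if v > 0 then st.2 + 1 else st.2))
    ([], (0 : Int))
  -- suf.reverse()
  let suf := st.1.reverse
  -- all(i + s >= v for i, (v, s) in enumerate(zip(body, suf)))
  (PySem.List.enumerate (body.zip suf) 0).all (fun e => decide (e.1 + e.2.2 ≥ e.2.1))

-- ===== PRECONDITION & SPEC =====
def Spec_checkIfSequenceIsPossible (sequence : List Int) (out : Bool) : Prop := out = checkIfSequenceIsPossible_alt sequence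
instance (sequence : List Int) (out : Bool) : Decidable (Spec_checkIfSequenceIsPossible sequence out) := by unfold Spec_checkIfSequenceIsPossible; infer_instance

-- ===== CLAIM (what is proved, stated in full; the proofs are below) =====
def Claim_equal_checkIfSequenceIsPossible : Prop := ∀ (sequence : List Int), Dom_checkIfSequenceIsPossible sequence → Spec_checkIfSequenceIsPossible sequence (checkIfSequenceIsPossible sequence)

-- ===== LEMMAS AND PROOFS =====

-- number of positive entries of a list, as an Int
def pvCnt (l : List Int) : Int := (l.countP (fun v => decide (0 < v)) : Int)

-- membership version of all-congruence (List.all_congr needs the pointwise hypothesis everywhere)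
theorem pvAll_congr {α : Type} (l : List α) (f g : α → Bool) (h : ∀ x ∈ l, f x = g x) :
    l.all f = l.all g := by
  induction l with
  | nil => rfl
  | cons a t ih => simp [List.all_cons, h a (by simp), ih (fun x hx => h x (by simp [hx]))]

-- A's early-return loop is an 'all' over the visited indices
theorem pvALoop_eq (sequence : List Int) (xs : List Int) :
    pvALoop sequence xs
      = xs.all (fun x => !decide (pvAInner sequence x < PySem.List.pyGetD sequence x 0)) := by
  induction xs with
  | nil => rfl
  | cons a t ih =>
      simp only [pvALoop, List.all_cons, ih]
      split_ifs with h <;> simp [h]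

-- B's right-to-left loop, characterised: first component lists the running counts, second is the total
theorem pvBFold (l : List Int) (acc : List Int) (c : Int) :
    l.foldl (fun (st : List Int × Int) v => (st.1 ++ [st.2], if v > 0 then st.2 + 1 else st.2)) (acc, c)
      = (acc ++ (List.range l.length).map (fun k => c + pvCnt (l.take k)), c + pvCnt l) := by
  induction l generalizing acc c with
  | nil => simp [pvCnt]
  | cons v t ih =>
      simp only [List.foldl_cons, ih, Prod.mk.injEq]
      constructor
      · simp only [List.length_cons, List.range_succ_eq_map, List.map_cons, List.map_map,
          List.take_zero, pvCnt, List.countP_nil, Int.natCast_zero, add_zero,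
          List.append_assoc, List.singleton_append]
        congr 1
        congr 1
        apply List.map_congr_left
        intro k _
        simp only [Function.comp_apply, List.take_succ_cons, List.countP_cons]
        split_ifs with h1 h2 <;> simp_all <;> omega
      · simp only [pvCnt, List.countP_cons]
        split_ifs with h1 h2 <;> simp_all <;> omega

-- ===== VERDICT (by name: the statement is the Claim_ definition above) =====
-- A's inner loop counts the positives of sequence[:-1] strictly after index x
theorem pvAInner_eq (sequence : List Int) (x : Int) (hx : 0 ≤ x) (hn : 1 ≤ sequence.length) :
    pvAInner sequence x = x + pvCnt (sequence.dropLast.drop (x.toNat + 1)) := by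
  unfold pvAInner
  have hb : ((sequence.length : Int) - 1) = (sequence.dropLast.length : Int) := by
    simp [List.length_dropLast]; omega
  rw [hb]
  rw [PySem.List.foldl_congr_mem _ _
      (fun count j => if PySem.List.pyGetD sequence.dropLast j 0 > 0 then count + 1 else count) _ ?_]
  · rw [PySem.List.foldl_pyRange_pyGetD' sequence.dropLast 0
      (fun count v => if v > 0 then count + 1 else count) x (by omega)]
    have ht : (x + 1).toNat = x.toNat + 1 := by omega
    rw [PySem.List.foldl_ite_add_one, ht]
    rfl
  · intro acc j hj
    rw [PySem.List.mem_pyRange_one] at hj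
    have hj1 : (0:Int) ≤ j := by omega
    have hj2 : j < (sequence.dropLast.length : Int) := hj.2
    have hj3 : j < (sequence.length : Int) := by simp [List.length_dropLast] at hj2 ⊢; omega
    simp only [PySem.List.pyGetD_eq_getElem _ _ hj1 hj3,
      PySem.List.pyGetD_eq_getElem _ _ hj1 hj2, List.getElem_dropLast]

-- B's suffix list, re-indexed left to right
theorem pvSuf_eq (body : List Int) :
    (List.map (fun k => 0 + pvCnt (List.take k body.reverse)) (List.range body.reverse.length)).reverse
      = List.map (fun k => pvCnt (body.drop (k + 1))) (List.range body.length) := by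
  apply List.ext_getElem
  · simp
  · intro i h1 h2
    simp only [List.length_reverse, List.length_map, List.length_range] at h1 h2
    simp only [List.getElem_reverse, List.length_map, List.length_range, List.getElem_map,
      List.getElem_range, zero_add]
    rw [List.take_reverse]
    have : body.reverse.length - 1 - i = body.length - (i + 1) := by
      simp only [List.length_reverse]; omega
    rw [this]
    have hdrop : body.length - (body.length - (i + 1)) = i + 1 := by omega
    rw [hdrop]
    simp [pvCnt, List.countP_reverse]

-- ===== VERDICT (by name: the statement is the Claim_ definition above) =====
theorem checkIfSequenceIsPossible_spec : Claim_equal_checkIfSequenceIsPossible := by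
  intro sequence _
  unfold Spec_checkIfSequenceIsPossible
  by_cases hne : sequence = []
  · subst hne; decide
  · have hn : 1 ≤ sequence.length := List.length_pos_of_ne_nil hne
    rw [checkIfSequenceIsPossible, pvALoop_eq]
    simp only [checkIfSequenceIsPossible_alt, PySem.List.slice_to_neg_one,
      pvBFold, List.nil_append,
      PySem.List.enumerate_eq_map_pyRange _ ((0 : Int), (0 : Int)), List.all_map]
    rw [pvSuf_eq]
    have hzlen : (sequence.dropLast.zip
        (List.map (fun k => pvCnt (sequence.dropLast.drop (k + 1))) (List.range sequence.dropLast.length))).length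
        = sequence.dropLast.length := by simp
    have hlen : PySem.List.len (sequence.dropLast.zip
        (List.map (fun k => pvCnt (sequence.dropLast.drop (k + 1))) (List.range sequence.dropLast.length)))
        = (sequence.length : Int) - 1 := by
      simp [PySem.List.len, List.length_dropLast]; omega
    rw [hlen]
    apply pvAll_congr
    intro x hx
    rw [PySem.List.mem_pyRange_one] at hx
    obtain ⟨hx0, hx1⟩ := hx
    have hxm : x < (sequence.dropLast.length : Int) := by
      simp only [List.length_dropLast]; omega
    have hxz : x < ((sequence.dropLast.zip
        (List.map (fun k => pvCnt (sequence.dropLast.drop (k + 1))) (List.range sequence.dropLast.length))).length : Int) := by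
      rw [hzlen]; exact hxm
    have hxn : x < (sequence.length : Int) := by omega
    rw [pvAInner_eq sequence x hx0 hn]
    simp only [Function.comp_apply, PySem.List.pyGetD_eq_getElem _ _ hx0 hxn,
      PySem.List.pyGetD_eq_getElem _ _ hx0 hxz]
    simp only [List.getElem_zip, List.getElem_map, List.getElem_range, List.getElem_dropLast]
    simp only [ge_iff_le, ← decide_not, not_lt]
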